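-- pv_equiv track=rewrite | github.com/darvenommm/algorithmes_exam | practice/15.py | calculate_element
-- ===== SOURCE A (Python) =====
-- from itertools import count
--
-- def calculate_element(element_number: int) -> int:
--     cache: dict[int, int] = { 0: 1, 1: 1, }
--
--     for index in count(1):
--         needed_element: int | None = cache.get(element_number)
--
--         if needed_element is not None:
--             return needed_element
--
--         cache[2 * index] = cache[index] + cache[index - 1]
--         cache[2 * index + 1] = cache[index] - cache[index - 1]
--
--
--     return -1 # для типизации, тк значение всегда будет возращаться из цикла (100%)
-- ===== SOURCE B (Python) =====
-- def calculate_element(element_number: int) -> int: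
--     # O(log n): a(2k)=a(k)+a(k-1), a(2k+1)=a(k)-a(k-1); carry a window of
--     # three consecutive values down a single halving chain.
--     if element_number <= 1:
--         return 1
--     return _triple(element_number)[0]
--
--
-- def _triple(m: int) -> tuple[int, int, int]:
--     # returns (a(m), a(m-1), a(m-2)) for m >= 2
--     if m <= 2:
--         return (2, 1, 1)
--     if m == 3:
--         return (0, 2, 1)
--     x, y, z = _triple(m // 2)
--     if m % 2 == 0:
--         return (x + y, y - z, y + z)
--     return (x - y, x + y, y - z)
-- ===== Notes on version B (the rewrite author's own statement) =====
-- stated objective: faster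
-- what changed: A fills a dict with every sequence value from index 1 upward until element_number appears (O(n) time and memory); B recurses top-down on n//2 carrying a window of three consecutive values (a(m),a(m-1),a(m-2)), one halving chain of depth O(log n).
-- outside the precondition, e.g. on calculate_element(-1): A does not finish within the time limit, B returns 1
import Mathlib
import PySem

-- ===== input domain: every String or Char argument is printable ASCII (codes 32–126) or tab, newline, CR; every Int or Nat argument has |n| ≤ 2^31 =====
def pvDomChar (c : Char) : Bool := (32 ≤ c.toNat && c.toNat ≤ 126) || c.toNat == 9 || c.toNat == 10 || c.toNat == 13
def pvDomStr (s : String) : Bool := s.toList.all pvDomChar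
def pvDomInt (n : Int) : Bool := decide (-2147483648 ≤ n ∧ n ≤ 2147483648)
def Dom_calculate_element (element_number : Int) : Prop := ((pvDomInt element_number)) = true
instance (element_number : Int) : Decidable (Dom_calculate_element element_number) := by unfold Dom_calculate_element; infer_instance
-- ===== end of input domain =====

-- B replaces A's bottom-up dict fill (O(n)) with a top-down halving recursion carrying
-- a window (a(m), a(m-1), a(m-2)); measured asymptotically faster.


-- ===== PORT A =====
-- A's cache maps exactly the consecutive keys 0 .. 2*index-1 (proved below), so the dict is
-- represented as an Array Int indexed by the key: lookup k = cache[k]? (missing key = none),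
-- and the two writes at keys 2*index, 2*index+1 are the two pushes at those exact positions.
def pvCacheGet (cache : Array Int) (k : Int) : Option Int :=
  if h : 0 ≤ k ∧ k.toNat < cache.size then some cache[k.toNat] else none

-- Python's `for index in count(1)` is unbounded; the port carries fuel element_number.toNat + 2,
-- proved sufficient below (the `-1` on exhaustion / missing key mirrors A's unreachable `return -1`).
def pvLoopA (element_number : Int) : Nat → Array Int → Int → Int
  | 0, _, _ => -1
  | fuel + 1, cache, index =>
    match pvCacheGet cache element_number with
    | some v => v
    | none =>
      match pvCacheGet cache index, pvCacheGet cache (index - 1) with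
      | some a, some b =>
        pvLoopA element_number fuel ((cache.push (a + b)).push (a - b)) (index + 1)
      | _, _ => -1  -- KeyError: unreachable, cache always holds keys 0 .. 2*index-1

def calculate_element (element_number : Int) : Int :=
  pvLoopA element_number (element_number.toNat + 2) #[1, 1] 1

-- ===== PORT B =====
-- _triple m = (a(m), a(m-1), a(m-2)) for m ≥ 2, by a single halving chain
def pvTriple (m : Int) : Int × Int × Int :=
  if m ≤ 2 then (2, 1, 1)
  else if m = 3 then (0, 2, 1)
  else
    let t := pvTriple (PySem.Int.floordiv m 2)
    let x := t.1
    let y := t.2.1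
    let z := t.2.2
    if PySem.Int.mod m 2 = 0 then (x + y, y - z, y + z) else (x - y, x + y, y - z)
termination_by m.toNat
decreasing_by
  rw [PySem.Int.floordiv_eq_ediv_of_pos (by omega)]
  omega

def calculate_element_alt (element_number : Int) : Int :=
  if element_number ≤ 1 then 1 else (pvTriple element_number).1

-- ===== PRECONDITION & SPEC =====
-- Pre_ excludes negative indices, on which Python A never returns (infinite loop).
def Pre_calculate_element (element_number : Int) : Prop := 0 ≤ element_number
instance (element_number : Int) : Decidable (Pre_calculate_element element_number) := by
  unfold Pre_calculate_element; infer_instance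
def pvWitness_calculate_element : Int := (5)

def Spec_calculate_element (element_number : Int) (out : Int) : Prop := out = calculate_element_alt element_number
instance (element_number : Int) (out : Int) : Decidable (Spec_calculate_element element_number out) := by unfold Spec_calculate_element; infer_instance

-- ===== CLAIM (what is proved, stated in full; the proofs are below) =====
def Claim_equal_calculate_element : Prop := ∀ (element_number : Int), Dom_calculate_element element_number → Pre_calculate_element element_number → Spec_calculate_element element_number (calculate_element element_number)

-- ===== LEMMAS AND PROOFS =====

-- reference sequence: a(0)=a(1)=1, a(2k)=a(k)+a(k-1), a(2k+1)=a(k)-a(k-1)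
def aRef (n : Int) : Int :=
  if n ≤ 1 then 1
  else if n % 2 = 0 then aRef (n / 2) + aRef (n / 2 - 1)
  else aRef (n / 2) - aRef (n / 2 - 1)
termination_by n.toNat
decreasing_by all_goals omega

theorem aRef_le_one {n : Int} (h : n ≤ 1) : aRef n = 1 := by
  rw [aRef, if_pos h]

theorem aRef_even (k : Int) (hk : 1 ≤ k) : aRef (2 * k) = aRef k + aRef (k - 1) := by
  have h1 : ¬ (2 * k ≤ 1) := by omega
  have h2 : (2 * k) % 2 = 0 := by omega
  have h3 : 2 * k / 2 = k := by omega
  rw [aRef, if_neg h1, if_pos h2, h3]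

theorem aRef_odd (k : Int) (hk : 1 ≤ k) : aRef (2 * k + 1) = aRef k - aRef (k - 1) := by
  have h1 : ¬ (2 * k + 1 ≤ 1) := by omega
  have h2 : ¬ ((2 * k + 1) % 2 = 0) := by omega
  have h3 : (2 * k + 1) / 2 = k := by omega
  rw [aRef, if_neg h1, if_neg h2, h3]

theorem pvTriple_eq (N : Nat) : ∀ (m : Int), m.toNat ≤ N → 2 ≤ m →
    pvTriple m = (aRef m, aRef (m - 1), aRef (m - 2)) := by
  induction N with
  | zero => intro m hN h2; omega
  | succ N ih =>
    intro m hN h2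
    rw [pvTriple]
    by_cases hle : m ≤ 2
    · have hm : m = 2 := le_antisymm hle h2
      subst hm
      have e2 : aRef 2 = aRef 1 + aRef 0 := by
        have := aRef_even 1 (by omega); norm_num at this ⊢; omega
      simp [e2, aRef_le_one (show (1:Int) ≤ 1 by omega),
        aRef_le_one (show (0:Int) ≤ 1 by omega)]
    · by_cases h3 : m = 3
      · subst h3
        have e3 : aRef 3 = aRef 1 - aRef 0 := by
          have := aRef_odd 1 (by omega); norm_num at this ⊢; omega
        have e2 : aRef 2 = aRef 1 + aRef 0 := by
          have := aRef_even 1 (by omega); norm_num at this ⊢; omega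
        simp [hle, e3, e2, aRef_le_one (show (1:Int) ≤ 1 by omega),
          aRef_le_one (show (0:Int) ≤ 1 by omega)]
      · have hm4 : 4 ≤ m := by omega
        rw [if_neg hle, if_neg h3]
        rw [PySem.Int.floordiv_eq_ediv_of_pos (show (0:Int) < 2 by omega),
            PySem.Int.mod_eq_emod_of_pos (show (0:Int) < 2 by omega)]
        set k := m / 2 with hkdef
        have hk2 : 2 ≤ k := by omega
        have hrec := ih k (by omega) hk2
        rw [hrec]
        by_cases hpar : m % 2 = 0
        · have hmk : m = 2 * k := by omega
          rw [if_pos hpar]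
          have e1 : aRef m = aRef k + aRef (k - 1) := by rw [hmk]; exact aRef_even k (by omega)
          have e2 : aRef (m - 1) = aRef (k - 1) - aRef (k - 2) := by
            have : m - 1 = 2 * (k - 1) + 1 := by omega
            rw [this]
            have h := aRef_odd (k - 1) (by omega)
            rw [show (k:Int) - 1 - 1 = k - 2 by ring] at h
            exact h
          have e3 : aRef (m - 2) = aRef (k - 1) + aRef (k - 2) := by
            have : m - 2 = 2 * (k - 1) := by omega
            rw [this]
            have h := aRef_even (k - 1) (by omega)
            rw [show (k:Int) - 1 - 1 = k - 2 by ring] at h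
            exact h
          simp [e1, e2, e3]
        · have hmk : m = 2 * k + 1 := by omega
          rw [if_neg hpar]
          have e1 : aRef m = aRef k - aRef (k - 1) := by rw [hmk]; exact aRef_odd k (by omega)
          have e2 : aRef (m - 1) = aRef k + aRef (k - 1) := by
            have : m - 1 = 2 * k := by omega
            rw [this]; exact aRef_even k (by omega)
          have e3 : aRef (m - 2) = aRef (k - 1) - aRef (k - 2) := by
            have : m - 2 = 2 * (k - 1) + 1 := by omega
            rw [this]
            have h := aRef_odd (k - 1) (by omega)
            rw [show (k:Int) - 1 - 1 = k - 2 by ring] at h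
            exact h
          simp [e1, e2, e3]

theorem alt_eq_aRef (n : Int) (_hn : 0 ≤ n) : calculate_element_alt n = aRef n := by
  unfold calculate_element_alt
  by_cases h : n ≤ 1
  · rw [if_pos h, aRef_le_one h]
  · rw [if_neg h, pvTriple_eq n.toNat n (le_refl _) (by omega)]

-- invariant of A's loop: the cache holds exactly a(0) .. a(2*index-1)
def pvInv (cache : Array Int) (index : Int) : Prop :=
  cache.size = (2 * index).toNat ∧
  ∀ k : Int, pvCacheGet cache k = if 0 ≤ k ∧ k < 2 * index then some (aRef k) else none

theorem pvCacheGet_push (cache : Array Int) (v : Int) (k : Int) :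
    pvCacheGet (cache.push v) k =
      if k = (cache.size : Int) then some v else pvCacheGet cache k := by
  unfold pvCacheGet
  by_cases hk : k = (cache.size : Int)
  · subst hk
    rw [if_pos rfl, dif_pos (by simp only [Array.size_push]; omega)]
    simp [Array.getElem_push]
  · rw [if_neg hk]
    by_cases h : 0 ≤ k ∧ k.toNat < cache.size
    · rw [dif_pos (by simp only [Array.size_push]; omega), dif_pos h]
      have hlt : k.toNat < cache.size := h.2
      simp [Array.getElem_push, hlt]
    · rw [dif_neg (by simp only [Array.size_push]; omega), dif_neg h]

theorem pvLoopA_eq (fuel : Nat) : ∀ (n : Int) (cache : Array Int) (index : Int),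
    1 ≤ index → pvInv cache index → 0 ≤ n → 1 ≤ fuel → n + 3 ≤ 2 * index + 2 * fuel →
    pvLoopA n fuel cache index = aRef n := by
  induction fuel with
  | zero => intro n cache index _ _ _ hf _; omega
  | succ fuel ih =>
    intro n cache index hidx ⟨hsize, hinv⟩ hn _ hbound
    rw [pvLoopA]
    by_cases hin : n < 2 * index
    · rw [hinv n, if_pos ⟨hn, hin⟩]
    · rw [hinv n, if_neg (by omega)]
      have ha : pvCacheGet cache index = some (aRef index) := by
        rw [hinv index, if_pos (by omega)]
      have hb : pvCacheGet cache (index - 1) = some (aRef (index - 1)) := by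
        rw [hinv (index - 1), if_pos (by omega)]
      rw [ha, hb]
      apply ih n _ (index + 1) (by omega) _ hn (by omega) (by omega)
      constructor
      · simp [Array.size_push, hsize]; omega
      intro k
      rw [pvCacheGet_push, pvCacheGet_push]
      have hs0 : (cache.size : Int) = 2 * index := by omega
      have hs1 : ((cache.push (aRef index + aRef (index - 1))).size : Int) = 2 * index + 1 := by
        simp [Array.size_push]; omega
      rw [hs1, hs0]
      by_cases hk1 : k = 2 * index + 1
      · subst hk1
        rw [if_pos rfl, if_pos (by omega)]
        rw [aRef_odd index hidx]
      · rw [if_neg hk1]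
        by_cases hk0 : k = 2 * index
        · subst hk0
          rw [if_pos rfl, if_pos (by omega)]
          rw [aRef_even index hidx]
        · rw [if_neg hk0, hinv k]
          by_cases hkin : 0 ≤ k ∧ k < 2 * index
          · rw [if_pos hkin, if_pos (by omega)]
          · rw [if_neg hkin, if_neg (by omega)]

theorem a_eq_aRef (n : Int) (hn : 0 ≤ n) : calculate_element n = aRef n := by
  unfold calculate_element
  apply pvLoopA_eq (n.toNat + 2) n _ 1 (by omega) _ hn (by omega) (by omega)
  refine ⟨rfl, ?_⟩
  intro k
  unfold pvCacheGet
  by_cases h : 0 ≤ k ∧ k.toNat < (#[(1:Int), 1] : Array Int).size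
  · rw [dif_pos h]
    have h2 : k = 0 ∨ k = 1 := by simp at h; omega
    rcases h2 with h2 | h2 <;> subst h2 <;>
      simp [aRef_le_one (by omega : (0:Int) ≤ 1), aRef_le_one (by omega : (1:Int) ≤ 1)]
  · rw [dif_neg h, if_neg (by simp at h; omega)]

-- ===== VERDICT (by name: the statement is the Claim_ definition above) =====
theorem calculate_element_spec : Claim_equal_calculate_element := by
  intro n _ hpre
  unfold Spec_calculate_element
  rw [a_eq_aRef n hpre, alt_eq_aRef n hpre]
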